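-- pv_equiv track=rewrite | github.com/magzolich/Assignment_2 | vowels_dict.py | check_vowels
-- ===== SOURCE A (Python) =====
-- def check_vowels(word):
--     dict = {}
--     lower_word = word.lower()
--     for letter in lower_word:
--         vowels_list = ["a","e","i","o","u","y"]
--         if letter not in vowels_list:
--             continue
--         if letter in dict:
--             dict[letter]=dict[letter]+1
--         else:
--             dict[letter] = 1
--     return dict
-- ===== SOURCE B (Python) =====
-- def check_vowels(word):
--     lower_word = word.lower()
--     vowels = [letter for letter in lower_word if letter in ("a", "e", "i", "o", "u", "y")]
--     return {v: vowels.count(v) for v in dict.fromkeys(vowels)}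
-- ===== Notes on version B (the rewrite author's own statement) =====
-- stated objective: simpler
-- what changed: Single pass with incremental dict counting replaced by filter-to-vowels, ordered dedup of the keys, then one .count scan per distinct vowel.
import Mathlib
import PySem

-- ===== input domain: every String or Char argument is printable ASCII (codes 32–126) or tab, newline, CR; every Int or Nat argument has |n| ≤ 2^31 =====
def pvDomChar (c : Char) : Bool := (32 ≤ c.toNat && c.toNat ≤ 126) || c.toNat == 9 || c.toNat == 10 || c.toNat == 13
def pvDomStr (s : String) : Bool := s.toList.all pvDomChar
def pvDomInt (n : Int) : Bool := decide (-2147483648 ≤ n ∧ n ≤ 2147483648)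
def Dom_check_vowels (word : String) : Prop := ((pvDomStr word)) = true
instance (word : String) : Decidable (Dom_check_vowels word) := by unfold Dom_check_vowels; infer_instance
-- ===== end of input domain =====

-- B replaces A's single-pass incremental dict counting by filter → ordered dedup → one count per
-- distinct vowel (objective: simpler). Both return the same dict (same entries, same insertion order).

-- Python's iteration over a string yields 1-character strings; this builds them.
def pvMk1 (c : Char) : String := String.ofList [c]

-- ===== PORT A =====
def check_vowels (word : String) : List (String × Int) :=
  (((PySem.Str.lower word).toList.map pvMk1).foldl
    (fun d letter =>
      let vowels_list : List String := ["a", "e", "i", "o", "u", "y"]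
      if letter ∉ vowels_list then d
      else if d.contains letter then d.insert letter (d.getD letter 0 + 1)
      else d.insert letter 1)
    PySem.Dict.empty).items

-- ===== PORT B =====
def check_vowels_alt (word : String) : List (String × Int) :=
  let ss := (PySem.Str.lower word).toList.map pvMk1
  let vowels := ss.filter (fun letter => letter ∈ ["a", "e", "i", "o", "u", "y"])
  -- dict.fromkeys(vowels) is PySem.List.dedup; the comprehension's keys are therefore distinct,
  -- so the resulting dict's items are exactly this map (exact).
  (PySem.List.dedup vowels).map (fun v => (v, (vowels.count v : Int)))

-- ===== PRECONDITION & SPEC =====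
def Spec_check_vowels (word : String) (out : List (String × Int)) : Prop := out = check_vowels_alt word
instance (word : String) (out : List (String × Int)) : Decidable (Spec_check_vowels word out) := by unfold Spec_check_vowels; infer_instance

-- ===== CLAIM (what is proved, stated in full; the proofs are below) =====
def Claim_equal_check_vowels : Prop := ∀ (word : String), Dom_check_vowels word → Spec_check_vowels word (check_vowels word)

-- ===== LEMMAS AND PROOFS =====

-- A's counting step, with the membership guard stripped, is the counter step.
theorem pv_step_eq (d : PySem.Dict String Int) (s : String) :
    (if d.contains s then d.insert s (d.getD s 0 + 1) else d.insert s 1)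
      = d.insert s (d.getD s 0 + 1) := by
  by_cases h : d.contains s
  · simp [h]
  · have hn : d.get? s = none := by
      rcases hh : d.get? s with _ | v
      · rfl
      · exact absurd (by rw [PySem.Dict.contains_eq_isSome_get?, hh]; rfl) h
    simp [h, PySem.Dict.getD, hn]

theorem check_vowels_spec_aux (word : String) :
    check_vowels word = check_vowels_alt word := by
  unfold check_vowels check_vowels_alt
  have hfold :
      (((PySem.Str.lower word).toList.map pvMk1).foldl
        (fun d letter =>
          let vowels_list : List String := ["a", "e", "i", "o", "u", "y"]
          if letter ∉ vowels_list then d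
          else if d.contains letter then d.insert letter (d.getD letter 0 + 1)
          else d.insert letter 1)
        PySem.Dict.empty)
      = PySem.Dict.counter
          (((PySem.Str.lower word).toList.map pvMk1).filter
            (fun letter => letter ∈ ["a", "e", "i", "o", "u", "y"])) := by
    rw [← PySem.Dict.foldl_insert_getD_add_one_eq_counter, List.foldl_filter]
    congr 1
    funext d letter
    by_cases h : letter ∈ (["a", "e", "i", "o", "u", "y"] : List String)
    · simp only [h, not_true_eq_false, if_false, decide_true, if_true]
      exact pv_step_eq d letter
    · simp [h]
  rw [hfold, PySem.Dict.items_counter]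
  simp [PySem.List.dedup_eq_ofList]

-- ===== VERDICT (by name: the statement is the Claim_ definition above) =====
theorem check_vowels_spec : Claim_equal_check_vowels := by
  intro word _
  exact check_vowels_spec_aux word
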